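-- pv_equiv track=rewrite | github.com/krsrini/DSandAlgos | problems/count_all_subsets.py | count_all_subsets
-- ===== SOURCE A (Python) =====
-- def count_all_subsets(n):
--     subsetCount = 1
--     multiplier = 2
--
--     while n > 0:
--
--         if n % 2 == 1:
--             subsetCount *= multiplier
--
--         n //=2
--         multiplier *= multiplier
--
--     return subsetCount
-- ===== SOURCE B (Python) =====
-- def count_all_subsets(n):
--     return 2 ** n if n > 0 else 1
-- ===== Notes on version B (the rewrite author's own statement) =====
-- stated objective: simpler
-- what changed: Replaces A's hand-written square-and-multiply loop over the bits of n with a single closed-form built-in exponentiation (guarded so that non-positive n yields 1, as in A).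
import Mathlib
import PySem

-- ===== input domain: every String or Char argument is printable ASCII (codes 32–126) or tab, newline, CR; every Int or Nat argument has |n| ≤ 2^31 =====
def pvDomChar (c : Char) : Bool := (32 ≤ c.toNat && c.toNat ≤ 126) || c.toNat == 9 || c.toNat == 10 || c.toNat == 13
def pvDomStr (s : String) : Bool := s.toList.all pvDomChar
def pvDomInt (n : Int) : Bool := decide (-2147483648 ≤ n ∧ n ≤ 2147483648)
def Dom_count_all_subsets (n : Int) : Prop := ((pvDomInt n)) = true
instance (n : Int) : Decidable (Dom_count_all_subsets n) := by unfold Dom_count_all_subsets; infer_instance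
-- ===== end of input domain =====

-- B replaces A's square-and-multiply loop by the closed form 2^n (1 for n ≤ 0): simpler.

-- ===== PORT A =====
-- the 'while n > 0' loop of A, with state (n, subsetCount, multiplier)
def countLoopA (n subsetCount multiplier : Int) : Int :=
  if _ : n > 0 then
    countLoopA (PySem.Int.floordiv n 2)
      (if PySem.Int.mod n 2 = 1 then subsetCount * multiplier else subsetCount)
      (multiplier * multiplier)
  else
    subsetCount
termination_by n.toNat
decreasing_by
  have := PySem.Int.floordiv_eq_ediv_of_pos (a := n) (b := 2) (by omega)
  omega

def count_all_subsets (n : Int) : Int := countLoopA n 1 2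

-- ===== PORT B =====
def count_all_subsets_alt (n : Int) : Int := if n > 0 then 2 ^ n.toNat else 1

-- ===== PRECONDITION & SPEC =====
def Spec_count_all_subsets (n : Int) (out : Int) : Prop := out = count_all_subsets_alt n
instance (n : Int) (out : Int) : Decidable (Spec_count_all_subsets n out) := by unfold Spec_count_all_subsets; infer_instance

-- ===== CLAIM (what is proved, stated in full; the proofs are below) =====
def Claim_equal_count_all_subsets : Prop := ∀ (n : Int), Dom_count_all_subsets n → Spec_count_all_subsets n (count_all_subsets n)

-- ===== LEMMAS AND PROOFS =====
-- invariant of A's loop: it returns subsetCount * multiplier ^ n.toNat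
theorem countLoopA_eq (k : Nat) : ∀ (n sc m : Int), n.toNat = k →
    countLoopA n sc m = sc * m ^ n.toNat := by
  induction k using Nat.strong_induction_on with
  | _ k ih =>
    intro n sc m hk
    by_cases hn : n > 0
    · rw [countLoopA, dif_pos hn]
      have h2 : (0:Int) < 2 := by omega
      have hdiv := PySem.Int.floordiv_eq_ediv_of_pos (a := n) (b := 2) h2
      have hmod := PySem.Int.mod_eq_emod_of_pos (a := n) (b := 2) h2
      have hlt : (PySem.Int.floordiv n 2).toNat < k := by rw [hdiv]; omega
      rw [ih _ hlt _ _ _ rfl]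
      have hq : (PySem.Int.floordiv n 2).toNat = n.toNat / 2 := by
        rw [hdiv]; omega
      have hsplit : n.toNat = 2 * (n.toNat / 2) + n.toNat % 2 := by omega
      have hpow : m ^ n.toNat =
          (if n.toNat % 2 = 1 then m else 1) * (m * m) ^ (n.toNat / 2) := by
        conv_lhs => rw [hsplit]
        rcases Nat.mod_two_eq_zero_or_one n.toNat with h | h <;>
          simp [h, pow_mul, pow_succ, mul_pow]; ring
      have hmod' : (PySem.Int.mod n 2 = 1) ↔ (n.toNat % 2 = 1) := by
        rw [hmod]; omega
      rw [hq, hpow]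
      by_cases hodd : n.toNat % 2 = 1
      · rw [if_pos (hmod'.mpr hodd), if_pos hodd]; ring
      · rw [if_neg (fun h => hodd (hmod'.mp h)), if_neg hodd]; ring
    · rw [countLoopA, dif_neg hn]
      have : n.toNat = 0 := by omega
      simp [this]

-- ===== VERDICT (by name: the statement is the Claim_ definition above) =====
theorem count_all_subsets_spec : Claim_equal_count_all_subsets := by
  intro n _
  unfold Spec_count_all_subsets count_all_subsets count_all_subsets_alt
  rw [countLoopA_eq n.toNat n 1 2 rfl]
  split_ifs with hn
  · ring
  · have : n.toNat = 0 := by omega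
    simp [this]
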